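-- pv_equiv track=rewrite | github.com/rlagusgh0223/Algorithm | 230101/17140, 이차원 배열과 연산.py | process
-- ===== SOURCE A (Python) =====
-- def sort_row(row):
--     counter = dict()  # 원소의 개수를 세는 카운터
--     for x in row:
--         if x == 0:  # 0은 무시
--             continue
--         if x not in counter:
--             counter[x] = 1
--         else:
--             counter[x] += 1
--     # 정렬 기준 : 1. 수의 등장 횟수가 커지는 순, 2. 수가 커지는 순
--     sorted_counter = sorted(counter.items(), key=lambda x:(x[1], x[0]))
--     # 정렬된 결과를 배열에 넣을 때는 (수, 등장 횟수)를 넣기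
--     result = []
--     for val, cnt in sorted_counter:
--         result += [val, cnt]
--     return result
--
-- def transpose(matrix):
--     row_length = len(matrix)  # 행(row)의 길이
--     column_length = len(matrix[0])  # 열(column)의 길이
--     # 전치 행렬 만들기
--     result = [[0]*row_length for i in range(column_length)]
--     # 전치 행렬에 값 채워넣기
--     for i in range(column_length):
--         for j in range(row_length):
--             result[i][j] = matrix[j][i]
--     return result
--
-- def process(matrix, operator):
--     if operator == 'C':  # C 연산인 경우
--         matrix = transpose(matrix)
--     max_length = 0
--     # 각 행을 기준으로 정렬 수행
--     for i in range(len(matrix)):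
--         matrix[i] = sort_row(matrix[i])
--         # 가장 긴 행 계산하기
--         max_length = max(max_length, len(matrix[i]))
--     # 가장 긴 행보다 짧은 행들은 0을 채우기
--     for i in range(len(matrix)):
--         gap = max_length - len(matrix[i])
--         matrix[i] += [0] * gap
--         # 길이가 100을 넘어가지 않도록 자르기
--         matrix[i] = matrix[i][:100]
--     if operator == 'C':  # 연산인 경우
--         matrix = transpose(matrix)
--     return matrix
-- ===== SOURCE B (Python) =====
-- # B: sort-then-run-length-encode instead of dict counting, no transpose helper
-- # (reads columns directly and rebuilds rows by index), closed-form clip-then-pad.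
-- # B never mutates its argument (A mutates it for the row operation); the
-- # equivalence is about the return value only.
-- def sort_row(row):
--     xs = sorted(x for x in row if x != 0)
--     runs = []
--     for x in xs:
--         if runs and runs[-1][1] == x:
--             runs[-1] = (runs[-1][0] + 1, x)
--         else:
--             runs.append((1, x))
--     runs.sort()
--     out = []
--     for c, v in runs:
--         out.append(v)
--         out.append(c)
--     return out
--
-- def process(matrix, operator):
--     if operator == 'C':
--         rows = [sort_row([r[c] for r in matrix]) for c in range(len(matrix[0]))]
--     else:
--         rows = [sort_row(r) for r in matrix]
--     L = 0
--     for r in rows: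
--         if len(r) > L:
--             L = len(r)
--     if L > 100:
--         L = 100
--     padded = [r[:L] + [0] * (L - len(r)) for r in rows]
--     if operator == 'C':
--         return [[col[i] for col in padded] for i in range(L)]
--     return padded
-- ===== Notes on version B (the rewrite author's own statement) =====
-- stated objective: alternative
-- what changed: B replaces the dict-counter by sort-then-run-length-encode (sort the nonzero values, scan once collecting (count,value) runs, sort the runs lexicographically), drops the transpose helper entirely (for 'C' it reads columns directly and rebuilds the result rows by index), and replaces the two mutate-in-place passes (sort+track max, then pad+clip) by a single running-max loop and a closed-form clip-then-pad r[:L]+[0]*(L-len(r)); B never mutates its argument (A mutates it for the row operation), so equivalence is about the return value.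
import Mathlib
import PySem

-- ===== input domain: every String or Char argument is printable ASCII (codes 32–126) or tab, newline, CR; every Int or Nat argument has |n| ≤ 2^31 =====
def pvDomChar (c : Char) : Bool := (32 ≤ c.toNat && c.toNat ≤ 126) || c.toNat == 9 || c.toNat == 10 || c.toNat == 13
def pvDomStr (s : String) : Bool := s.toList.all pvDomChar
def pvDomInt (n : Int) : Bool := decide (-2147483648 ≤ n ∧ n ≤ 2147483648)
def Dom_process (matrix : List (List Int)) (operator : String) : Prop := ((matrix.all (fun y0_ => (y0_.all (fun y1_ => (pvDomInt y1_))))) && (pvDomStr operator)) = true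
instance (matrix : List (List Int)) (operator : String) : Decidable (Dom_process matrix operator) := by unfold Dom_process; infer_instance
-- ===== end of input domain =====

-- B replaces the dict counter by sort-then-run-length-encode, drops the transpose
-- helper (column reads + row rebuild by index), and clips-then-pads by a closed form;
-- B returns a fresh matrix (A mutates its argument for the row operation — the claim
-- is about the return value only). Objective: alternative.

-- ===== PORT A =====
-- counter loop, sorted(counter.items(), key=(cnt,val)), then flatten [val, cnt]
def sortRowA (row : List Int) : List Int :=
  let counter : PySem.Dict Int Int :=
    row.foldl (fun c x =>
      if x == 0 then c
      else if !(c.contains x) then c.insert x 1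
      else c.insert x (c.getD x 0 + 1)) PySem.Dict.empty
  let sortedCounter := PySem.List.sorted2 counter.items (fun p => p.2) (fun p => p.1)
  sortedCounter.foldl (fun result p => result ++ [p.1, p.2]) []

-- result[i][j] = matrix[j][i]; each cell of the zero-filled result is written exactly
-- once by the two loops, so the nested map is exact; len(matrix[0]) raises IndexError on
-- [] (excluded by Pre_), ported as headD; matrix[j][i] is in range under Pre_ (getD).
def transposeA (m : List (List Int)) : List (List Int) :=
  let rowLength := m.length
  let columnLength := (m.headD []).length
  (List.range columnLength).map (fun i =>
    (List.range rowLength).map (fun j => (m.getD j []).getD i 0))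

def process (matrix : List (List Int)) (operator : String) : List (List Int) :=
  let m1 := if operator == "C" then transposeA matrix else matrix
  -- for i in range(len(matrix)): matrix[i] = sort_row(matrix[i]); max_length = max(…)
  let s := m1.foldl (fun (acc : List (List Int) × Int) row =>
      (acc.1 ++ [sortRowA row], max acc.2 (PySem.List.len (sortRowA row)))) ([], 0)
  -- for i …: matrix[i] += [0]*gap; matrix[i] = matrix[i][:100]
  let m3 := s.1.foldl (fun acc row =>
      acc ++ [PySem.List.slice (row ++ PySem.List.pyRepeat [0] (s.2 - PySem.List.len row))
                none (some 100)]) []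
  if operator == "C" then transposeA m3 else m3

-- ===== PORT B =====
-- one step of the run-collecting loop: 'if runs and runs[-1][1] == x: runs[-1] =
-- (runs[-1][0]+1, x) else: runs.append((1, x))' (runs[-1] = getLast?, rewrite of the
-- last element = dropLast ++ [·])
def rleStep (runs : List (Int × Int)) (x : Int) : List (Int × Int) :=
  match runs.getLast? with
  | some p => if p.2 == x then runs.dropLast ++ [(p.1 + 1, x)] else runs ++ [(1, x)]
  | none => runs ++ [(1, x)]

-- xs = sorted nonzero values; runs.sort() on int pairs is the lexicographic tuple
-- order, i.e. sorted with key (fst, snd) = PySem.List.sorted2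
def sortRowB (row : List Int) : List Int :=
  let xs := PySem.List.sorted (row.filter (fun x => !(x == 0))) (fun x => x) false
  let runs := xs.foldl rleStep []
  let runs2 := PySem.List.sorted2 runs (fun p => p.1) (fun p => p.2)
  runs2.foldl (fun out p => out ++ [p.2, p.1]) []

-- r[c] is in range under Pre_ (getD); col[i] is in range for i < L since every padded
-- row has length exactly L (getD)
def process_alt (matrix : List (List Int)) (operator : String) : List (List Int) :=
  let rows := if operator == "C"
    then (List.range (matrix.headD []).length).map
        (fun c => sortRowB (matrix.map (fun r => r.getD c 0)))
    else matrix.map sortRowB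
  let L0 := rows.foldl (fun L r => if PySem.List.len r > L then PySem.List.len r else L) 0
  let L := if L0 > 100 then 100 else L0
  let padded := rows.map (fun r => r.take L.toNat ++ List.replicate (L - PySem.List.len r).toNat 0)
  if operator == "C" then
    (List.range L.toNat).map (fun i => padded.map (fun col => col.getD i 0))
  else padded

-- ===== PRECONDITION & SPEC =====
-- Pre_ excludes exactly the inputs where A raises IndexError: operator 'C' with an empty
-- matrix, an empty first row, or some row shorter than the first (transpose reads
-- matrix[j][i] for i < len(matrix[0])).
def Pre_process (matrix : List (List Int)) (operator : String) : Prop :=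
  operator = "C" →
    matrix ≠ [] ∧ matrix.headD [] ≠ [] ∧ ∀ row ∈ matrix, (matrix.headD []).length ≤ row.length
instance (matrix : List (List Int)) (operator : String) : Decidable (Pre_process matrix operator) := by
  unfold Pre_process; infer_instance
def pvWitness_process : List (List Int) × String := ([[1, 0], [2, 2]], "C")

def Spec_process (matrix : List (List Int)) (operator : String) (out : List (List Int)) : Prop := out = process_alt matrix operator
instance (matrix : List (List Int)) (operator : String) (out : List (List Int)) : Decidable (Spec_process matrix operator out) := by unfold Spec_process; infer_instance

-- ===== CLAIM (what is proved, stated in full; the proofs are below) =====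
def Claim_equal_process : Prop := ∀ (matrix : List (List Int)) (operator : String), Dom_process matrix operator → Pre_process matrix operator → Spec_process matrix operator (process matrix operator)

-- ===== LEMMAS AND PROOFS =====

-- A's dict counter, read off: items = distinct nonzero values in first-occurrence
-- order, paired with their multiplicities
lemma counter_items (row : List Int) :
    (row.foldl (fun (c : PySem.Dict Int Int) x =>
      if x == 0 then c
      else if !(c.contains x) then c.insert x 1
      else c.insert x (c.getD x 0 + 1)) PySem.Dict.empty).items
    = (PySem.List.dedup (row.filter (fun x => !(x == 0)))).map
        (fun v => (v, (row.count v : Int))) := by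
  set step := fun (c : PySem.Dict Int Int) x =>
      if x == 0 then c
      else if !(c.contains x) then c.insert x 1
      else c.insert x (c.getD x 0 + 1) with hstep
  induction row using List.reverseRecOn with
  | nil => rfl
  | append_singleton ys y ih =>
    rw [List.foldl_append, List.foldl_cons, List.foldl_nil]
    set d := ys.foldl step PySem.Dict.empty with hdd
    set D := PySem.List.dedup (ys.filter (fun x => !(x == 0))) with hD
    have hmemD : ∀ v ∈ D, v ≠ 0 := by
      intro v hv
      have h1 := (PySem.List.mem_dedup _ v).1 hv
      have h2 := (List.mem_filter.1 h1).2
      simpa using h2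
    have hkeys : d.keys = D := by
      simp only [PySem.Dict.keys, ih, List.map_map]
      have hid : ((fun (x : Int × Int) => x.1) ∘ fun v => (v, (ys.count v : Int))) = id := rfl
      rw [hid, List.map_id]
    have hnodup : d.keys.Nodup := by rw [hkeys]; exact PySem.List.nodup_dedup _
    have hcont : ∀ x : Int, d.contains x = true ↔ x ∈ D := by
      intro x; rw [PySem.Dict.contains_iff_mem_keys, hkeys]
    by_cases hy0 : y = 0
    · subst hy0
      have h1 : step d 0 = d := by simp [hstep]
      have hF : (ys ++ [(0:Int)]).filter (fun x => !(x == 0)) = ys.filter (fun x => !(x == 0)) := by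
        simp [List.filter_append]
      rw [h1, hF, ← hD, ih]
      refine List.map_congr_left (fun v hv => ?_)
      have hvne : (0:Int) ≠ v := Ne.symm (hmemD v hv)
      simp [List.count_append, hvne]
    · have hy0b : (y == 0) = false := by simp [hy0]
      have hF : (ys ++ [y]).filter (fun x => !(x == 0)) = ys.filter (fun x => !(x == 0)) ++ [y] := by
        simp [List.filter_append, hy0b]
      by_cases hmem : y ∈ D
      · have hc : d.contains y = true := (hcont y).2 hmem
        have h1 : step d y = d.insert y (d.getD y 0 + 1) := by
          simp [hstep, hc, hy0]
        have hgetD : d.getD y 0 = (ys.count y : Int) := by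
          refine PySem.Dict.getD_of_mem_items d ?_ hnodup 0
          rw [ih]; exact List.mem_map_of_mem hmem
        have hDD : PySem.List.dedup ((ys ++ [y]).filter (fun x => !(x == 0))) = D := by
          rw [hF]
          simp only [PySem.List.dedup_eq_ofList, PySem.Set.ofList_append_singleton]
          rw [PySem.Set.add_of_mem]
          · rw [hD, PySem.List.dedup_eq_ofList]
          · have : y ∈ D := hmem
            rw [hD, PySem.List.dedup_eq_ofList] at this
            exact this
        rw [h1, PySem.Dict.items_insert_of_contains d _ hc, ih, hgetD, hDD, List.map_map]
        refine List.map_congr_left (fun v hv => ?_)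
        by_cases hvy : v = y
        · subst hvy
          simp [List.count_append]
        · have hvyb : (v == y) = false := by simp [hvy]
          have : y ≠ v := Ne.symm hvy
          simp [Function.comp, hvyb, List.count_append, this]
      · have hc : d.contains y = false := by
          cases hb : d.contains y with
          | false => rfl
          | true => exact absurd ((hcont y).1 hb) hmem
        have h1 : step d y = d.insert y 1 := by simp [hstep, hc, hy0]
        have hyD : y ∉ PySem.Set.ofList (ys.filter (fun x => !(x == 0))) := by
          rw [← PySem.List.dedup_eq_ofList, ← hD]; exact hmem
        have hDD : PySem.List.dedup ((ys ++ [y]).filter (fun x => !(x == 0))) = D ++ [y] := by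
          rw [hF]
          simp only [PySem.List.dedup_eq_ofList, PySem.Set.ofList_append_singleton]
          rw [PySem.Set.add_of_not_mem hyD, hD, PySem.List.dedup_eq_ofList]
        have hyys : y ∉ ys := by
          intro hin
          apply hyD
          rw [PySem.Set.mem_ofList, List.mem_filter]
          exact ⟨hin, by simp [hy0]⟩
        rw [h1, PySem.Dict.items_insert_of_not_contains d _ hc, ih, hDD, List.map_append]
        congr 1
        · refine List.map_congr_left (fun v hv => ?_)
          have hvy : y ≠ v := by rintro rfl; exact hmem hv
          simp [List.count_append, hvy]
        · have : List.count y ys = 0 := List.count_eq_zero.2 hyys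
          simp [List.count_append, this]

lemma insertBy_map_swap (lt lt' : Int × Int → Int × Int → Bool)
    (h : ∀ a b, lt' (Prod.swap a) (Prod.swap b) = lt a b) (x : Int × Int) (ys : List (Int × Int)) :
    PySem.List.insertBy lt' (Prod.swap x) (ys.map Prod.swap)
      = (PySem.List.insertBy lt x ys).map Prod.swap := by
  induction ys with
  | nil => rfl
  | cons z zs ih =>
    simp only [List.map_cons, PySem.List.insertBy, h]
    by_cases hb : lt x z
    · simp [hb]
    · simp [hb, ih]

lemma sorted2_swap (xs : List (Int × Int)) :
    PySem.List.sorted2 (xs.map Prod.swap) (fun p => p.2) (fun p => p.1)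
      = (PySem.List.sorted2 xs (fun p => p.1) (fun p => p.2)).map Prod.swap := by
  simp only [PySem.List.sorted2]
  have key : ∀ (acc : List (Int × Int)),
      (xs.map Prod.swap).foldl
        (fun acc x => PySem.List.insertBy
          (fun a b => decide (a.2 < b.2) || !decide (b.2 < a.2) && decide (a.1 < b.1)) x acc)
        (acc.map Prod.swap)
      = (xs.foldl (fun acc x => PySem.List.insertBy
          (fun a b => decide (a.1 < b.1) || !decide (b.1 < a.1) && decide (a.2 < b.2)) x acc)
          acc).map Prod.swap := by
    induction xs with
    | nil => intro acc; rfl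
    | cons z zs ih =>
      intro acc
      simp only [List.map_cons, List.foldl_cons]
      rw [show PySem.List.insertBy
          (fun a b => decide (a.2 < b.2) || !decide (b.2 < a.2) && decide (a.1 < b.1)) z.swap (acc.map Prod.swap)
        = (PySem.List.insertBy
          (fun a b => decide (a.1 < b.1) || !decide (b.1 < a.1) && decide (a.2 < b.2)) z acc).map Prod.swap
        from insertBy_map_swap _ _ (fun a b => rfl) z acc]
      exact ih _
  simpa using key []

-- sorting int pairs by the tuple key (fst, snd) is sorting by the lexicographic order
lemma sorted2_eq_sorted_toLex (xs : List (Int × Int)) :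
    PySem.List.sorted2 xs (fun p => p.1) (fun p => p.2)
      = PySem.List.sorted xs (fun p => toLex p) false := by
  simp only [PySem.List.sorted2, PySem.List.sorted]
  congr 1
  funext acc x
  congr 1
  funext a b
  rcases lt_trichotomy a.1 b.1 with h | h | h
  · simp [Prod.Lex.toLex_lt_toLex, h]
  · simp [Prod.Lex.toLex_lt_toLex, h]
  · have h1 : ¬ a.1 < b.1 := not_lt_of_gt h
    have h2 : a.1 ≠ b.1 := h.ne'
    simp [Prod.Lex.toLex_lt_toLex, h, h1, h2]

lemma dedup_sublist (ys : List Int) : (PySem.List.dedup ys).Sublist ys := by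
  induction ys using List.reverseRecOn with
  | nil => simp [PySem.List.dedup_eq_ofList]
  | append_singleton zs z ih =>
    rw [PySem.List.dedup_eq_ofList, PySem.Set.ofList_append_singleton, PySem.Set.add_eq_ite]
    rw [PySem.List.dedup_eq_ofList] at ih
    by_cases hm : z ∈ PySem.Set.ofList zs
    · rw [if_pos hm]
      exact ih.trans (List.sublist_append_left zs [z])
    · rw [if_neg hm]
      exact ih.append (List.Sublist.refl [z])

-- run-length encoding of an already-sorted list = its distinct values (in order of
-- first occurrence) with their multiplicities
lemma rle_sorted (xs : List Int) (h : xs.Pairwise (· ≤ ·)) :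
    xs.foldl rleStep [] = (PySem.List.dedup xs).map (fun v => ((xs.count v : Int), v)) := by
  induction xs using List.reverseRecOn with
  | nil => rfl
  | append_singleton ys y ih =>
    have hys : ys.Pairwise (· ≤ ·) := (List.pairwise_append.1 h).1
    have hle : ∀ z ∈ ys, z ≤ y := fun z hz =>
      (List.pairwise_append.1 h).2.2 z hz y (List.mem_singleton_self _)
    rw [List.foldl_append, List.foldl_cons, List.foldl_nil, ih hys]
    by_cases hnil : ys = []
    · subst hnil
      simp [rleStep, PySem.List.dedup_eq_ofList, PySem.Set.ofList, PySem.Set.add]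
    · set D := PySem.List.dedup ys with hD
      have hDne : D ≠ [] := by
        have hm : ys.getLast hnil ∈ D := by
          rw [hD, PySem.List.mem_dedup]; exact List.getLast_mem hnil
        intro hc; rw [hc] at hm; exact (List.not_mem_nil).elim hm
      have hDpw : D.Pairwise (· ≤ ·) := List.Pairwise.sublist (dedup_sublist ys) hys
      rcases List.eq_nil_or_concat D with hDE | ⟨E, w, hDE⟩
      · exact absurd hDE hDne
      rw [List.concat_eq_append] at hDE
      have hNodup : D.Nodup := by rw [hD]; exact PySem.List.nodup_dedup _
      have hwE : w ∉ E := by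
        have := hNodup
        rw [hDE] at this
        exact fun hc => (List.disjoint_of_nodup_append this) hc (List.mem_singleton_self _)
      have hw_mem : w ∈ ys := by
        have : w ∈ D := by rw [hDE]; exact List.mem_append_right _ (List.mem_singleton_self _)
        rw [hD, PySem.List.mem_dedup] at this
        exact this
      have hmax : ∀ z ∈ D, z ≤ w := by
        intro z hz
        rw [hDE] at hz
        rcases List.mem_append.1 hz with h1 | h1
        · have := hDpw
          rw [hDE] at this
          exact (List.pairwise_append.1 this).2.2 z h1 w (List.mem_singleton_self _)
        · rw [List.mem_singleton.1 h1]
      have hmap_last : (D.map (fun v => ((ys.count v : Int), v))).getLast?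
          = some ((ys.count w : Int), w) := by
        rw [hDE, List.map_append]
        simp
      by_cases hwy : w = y
      · -- y equals the largest value already seen: the last run is extended
        have hbeq : (w == y) = true := by simp [hwy]
        rw [rleStep, hmap_last]
        simp only [hbeq, if_pos]
        have hymem : y ∈ ys := hwy ▸ hw_mem
        have hDD : PySem.List.dedup (ys ++ [y]) = D := by
          simp only [PySem.List.dedup_eq_ofList, PySem.Set.ofList_append_singleton]
          rw [PySem.Set.add_of_mem (by rw [PySem.Set.mem_ofList]; exact hymem)]
          rw [hD, PySem.List.dedup_eq_ofList]
        rw [hDD, hDE, List.map_append, List.map_append]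
        simp only [List.map_cons, List.map_nil]
        rw [List.dropLast_concat]
        congr 1
        · refine List.map_congr_left (fun v hv => ?_)
          have hvy : y ≠ v := by
            rintro rfl; exact hwE (hwy ▸ hv)
          simp [List.count_append, hvy]
        · rw [hwy]
          simp [List.count_append]
      · -- y is a new value: a fresh run is appended
        have hbeq : (w == y) = false := by simp [hwy]
        rw [rleStep, hmap_last]
        simp only [hbeq, Bool.false_eq_true, if_false]
        have hymem : y ∉ ys := by
          intro hin
          have hyD : y ∈ D := by rw [hD, PySem.List.mem_dedup]; exact hin
          exact hwy (le_antisymm (hle w hw_mem) (hmax y hyD))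
        have hDD : PySem.List.dedup (ys ++ [y]) = D ++ [y] := by
          simp only [PySem.List.dedup_eq_ofList, PySem.Set.ofList_append_singleton]
          rw [PySem.Set.add_of_not_mem (by rw [PySem.Set.mem_ofList]; exact hymem)]
          rw [hD, PySem.List.dedup_eq_ofList]
        rw [hDD, List.map_append]
        congr 1
        · refine List.map_congr_left (fun v hv => ?_)
          have hvy : y ≠ v := by
            rintro rfl
            exact hymem (by rwa [hD, PySem.List.mem_dedup] at hv)
          simp [List.count_append, hvy]
        · have : List.count y ys = 0 := List.count_eq_zero.2 hymem
          simp [List.count_append, this]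

-- B's runs are a rearrangement of A's (value, count) table, swapped
lemma runs_perm (row : List Int) :
    ((PySem.List.sorted (row.filter (fun x => !(x == 0))) (fun x => x) false).foldl rleStep []).Perm
      ((PySem.List.dedup (row.filter (fun x => !(x == 0)))).map
        (fun v => ((row.count v : Int), v))) := by
  set F := row.filter (fun x => !(x == 0)) with hF
  set xs := PySem.List.sorted F (fun x => x) false with hxs
  have hpw : xs.Pairwise (· ≤ ·) := PySem.List.sorted_pairwise F (fun x => x)
  rw [rle_sorted xs hpw]
  have hcount : ∀ v ∈ PySem.List.dedup xs, (xs.count v : Int) = (row.count v : Int) := by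
    intro v hv
    have hvxs : v ∈ xs := (PySem.List.mem_dedup xs v).1 hv
    have hvF : v ∈ F := (PySem.List.mem_sorted F (fun x => x) false v).1 hvxs
    have hv0 : (v == 0) = false := by
      have := (List.mem_filter.1 (hF ▸ hvF)).2
      simpa using this
    have h1 : xs.count v = F.count v := (PySem.List.sorted_perm F (fun x => x) false).count_eq v
    have h2 : F.count v = row.count v := by
      rw [hF, List.count_filter]
      simp [hv0]
    rw [h1, h2]
  have hmap1 : (PySem.List.dedup xs).map (fun v => ((xs.count v : Int), v))
      = (PySem.List.dedup xs).map (fun v => ((row.count v : Int), v)) :=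
    List.map_congr_left (fun v hv => by rw [hcount v hv])
  rw [hmap1]
  refine List.Perm.map _ ?_
  refine (List.perm_ext_iff_of_nodup (PySem.List.nodup_dedup _) (PySem.List.nodup_dedup _)).2 ?_
  intro v
  rw [PySem.List.mem_dedup, PySem.List.mem_dedup, PySem.List.mem_sorted]

-- the two row transforms agree
lemma sortRow_eq (row : List Int) : sortRowA row = sortRowB row := by
  show (PySem.List.sorted2
      ((row.foldl (fun (c : PySem.Dict Int Int) x =>
        if x == 0 then c
        else if !(c.contains x) then c.insert x 1
        else c.insert x (c.getD x 0 + 1)) PySem.Dict.empty).items)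
      (fun p => p.2) (fun p => p.1)).foldl (fun result p => result ++ [p.1, p.2]) []
    = (PySem.List.sorted2
        ((PySem.List.sorted (row.filter (fun x => !(x == 0))) (fun x => x) false).foldl rleStep [])
        (fun p => p.1) (fun p => p.2)).foldl (fun out p => out ++ [p.2, p.1]) []
  rw [counter_items]
  set D := PySem.List.dedup (row.filter (fun x => !(x == 0))) with hD
  set pairs := D.map (fun v => ((row.count v : Int), v)) with hpairs
  have hswap : D.map (fun v => (v, (row.count v : Int))) = pairs.map Prod.swap := by
    rw [hpairs, List.map_map]; rfl
  rw [hswap, sorted2_swap pairs,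
    sorted2_eq_sorted_toLex pairs, sorted2_eq_sorted_toLex,
    PySem.List.sorted_eq_sorted_of_perm _ _ _ (fun a b hab => toLex.injective hab) (runs_perm row).symm]
  rw [PySem.List.foldl_append_eq_flatMap (g := fun p : Int × Int => [p.1, p.2]),
    PySem.List.foldl_append_eq_flatMap (g := fun p : Int × Int => [p.2, p.1])]
  rw [List.flatMap_map]
  rfl

lemma map_range_getD {β : Type} (xs : List (List Int)) (f : List Int → β) :
    (List.range xs.length).map (fun j => f (xs.getD j [])) = xs.map f := by
  induction xs with
  | nil => rfl
  | cons x t ih =>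
    simp only [List.length_cons, List.range_succ_eq_map, List.map_cons, List.map_map]
    rw [show ((fun j => f ((x :: t).getD j [])) ∘ Nat.succ) = (fun j => f (t.getD j [])) from rfl]
    rw [ih]
    rfl

-- A pads to max then clips at 100; clipping first and padding the difference is the same
lemma take_pad (r : List Int) (m : Nat) (h : r.length ≤ m) :
    (r ++ List.replicate (m - r.length) 0).take 100
      = (r ++ List.replicate (min m 100) (0 : Int)).take (min m 100) := by
  rw [List.take_append, List.take_append, List.take_replicate, List.take_replicate]
  have htake : List.take 100 r = List.take (min m 100) r := by
    by_cases hm : m ≤ 100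
    · rw [List.take_of_length_le (by omega), List.take_of_length_le (by omega)]
    · rw [Nat.min_eq_right (by omega)]
  rw [htake]
  congr 1
  congr 1
  omega

lemma pad_clip (r : List Int) (n : Nat) :
    (r ++ List.replicate n (0 : Int)).take n = r.take n ++ List.replicate (n - r.length) 0 := by
  rw [List.take_append, List.take_replicate]
  congr 1
  congr 1
  omega

-- running max of the sorted-row lengths in A's first pass
def Mof (m1 : List (List Int)) : Int :=
  m1.foldl (fun acc row => max acc (PySem.List.len (sortRowA row))) 0

lemma fold1_eq (m1 : List (List Int)) :
    m1.foldl (fun (acc : List (List Int) × Int) row =>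
        (acc.1 ++ [sortRowA row], max acc.2 (PySem.List.len (sortRowA row))))
      (([] : List (List Int)), (0 : Int))
    = (m1.map sortRowA, Mof m1) := by
  rw [PySem.List.foldl_prod_mk (f := fun acc row => acc ++ [sortRowA row])
      (g := fun acc row => max acc (PySem.List.len (sortRowA row)))]
  rw [PySem.List.foldl_append_singleton_eq_map, List.nil_append]
  rfl

lemma fold2_eq (rows : List (List Int)) (M : Int) (h0 : 0 ≤ M)
    (hM : ∀ r ∈ rows, PySem.List.len r ≤ M) :
    rows.foldl (fun acc row =>
        acc ++ [PySem.List.slice (row ++ PySem.List.pyRepeat [0] (M - PySem.List.len row))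
          none (some 100)]) []
    = rows.map (fun row => (row ++ List.replicate (min M 100).toNat 0).take (min M 100).toNat) := by
  rw [PySem.List.foldl_append_singleton_eq_map
      (f := fun row => PySem.List.slice (row ++ PySem.List.pyRepeat [0] (M - PySem.List.len row))
        none (some 100)), List.nil_append]
  refine List.map_congr_left (fun r hr => ?_)
  have hle := hM r hr
  rw [PySem.List.len_eq] at hle
  rw [PySem.List.slice_to _ (by norm_num), PySem.List.pyRepeat_singleton, PySem.List.len_eq]
  have h1 : (M - (r.length : Int)).toNat = M.toNat - r.length := by omega
  have h2 : (min M 100).toNat = min M.toNat 100 := by omega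
  have h3 : ((100 : Int)).toNat = 100 := rfl
  rw [h1, h2, h3]
  exact take_pad r M.toNat (by omega)

-- B's running-max loop body is the max function
lemma maxfun_eq :
    (fun (L : Int) (r : List Int) => if PySem.List.len r > L then PySem.List.len r else L)
      = (fun (L : Int) (r : List Int) => max L (PySem.List.len r)) := by
  funext L r
  rw [max_def]
  split_ifs <;> omega

-- clipping at 100 first: B's L = min M 100
lemma clipL_eq (M : Int) : (if M > 100 then (100:Int) else M) = min M 100 := by
  rw [min_def]; split_ifs <;> omega

-- B's clip-then-pad of a row equals A's pad-then-clip, at L = min M 100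
lemma padded_eq (rows : List (List Int)) (M : Int) (hM0 : 0 ≤ M) :
    rows.map (fun r => r.take (min M 100).toNat
        ++ List.replicate ((min M 100) - PySem.List.len r).toNat 0)
    = rows.map (fun r => (r ++ List.replicate (min M 100).toNat 0).take (min M 100).toNat) := by
  refine List.map_congr_left (fun r _ => ?_)
  rw [pad_clip, PySem.List.len_eq]
  congr 1
  congr 1
  omega

-- ===== VERDICT (by name: the statement is the Claim_ definition above) =====
theorem process_spec : Claim_equal_process := by
  intro matrix operator hdom hpre
  unfold Spec_process
  by_cases hC : operator = "C"
  · subst hC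
    obtain ⟨hne, hhead, hlen⟩ := hpre rfl
    simp only [process, process_alt, transposeA, beq_self_eq_true, if_pos]
    rw [fold1_eq]
    dsimp only
    set Cn := (matrix.headD []).length with hCn
    set T := (List.range Cn).map (fun i =>
      (List.range matrix.length).map (fun j => ((matrix.getD j []).getD i 0))) with hT
    obtain ⟨hM0, hMle⟩ := PySem.List.le_foldl_max_int T (fun row => PySem.List.len (sortRowA row)) 0
    have harg : ∀ r ∈ T.map sortRowA, PySem.List.len r ≤ Mof T := by
      intro r hr
      obtain ⟨r0, hr0, rfl⟩ := List.mem_map.1 hr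
      exact hMle r0 hr0
    rw [fold2_eq (T.map sortRowA) (Mof T) hM0 harg]
    set K := (min (Mof T) 100).toNat with hK
    set padK := fun col : List Int => (col ++ List.replicate K (0 : Int)).take K with hpadK
    -- B's columns are A's transposed rows
    have hcols : (List.range Cn).map (fun c => sortRowB (matrix.map (fun row => row.getD c 0)))
        = T.map sortRowA := by
      rw [hT, List.map_map]
      refine List.map_congr_left (fun i _ => ?_)
      show sortRowB (matrix.map (fun row => row.getD i 0))
          = sortRowA ((List.range matrix.length).map (fun j => ((matrix.getD j []).getD i 0)))
      rw [map_range_getD matrix (fun row => row.getD i 0), sortRow_eq]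
    have hfoldT : (T.map sortRowA).foldl (fun L r => max L (PySem.List.len r)) 0 = Mof T := by
      rw [List.foldl_map]; rfl
    have hM0' : (0:Int) ≤ Mof T := hM0
    rw [hcols, maxfun_eq, hfoldT, clipL_eq, padded_eq _ _ hM0']
    set m3 := (T.map sortRowA).map padK with hm3
    have hTne : T ≠ [] := by
      have : 0 < Cn := List.length_pos_iff.mpr hhead
      rw [hT]
      simp only [ne_eq, List.map_eq_nil_iff, List.range_eq_nil]
      omega
    have hpadlen : ∀ col : List Int, (padK col).length = K := by
      intro col
      rw [hpadK]
      simp only [List.length_take, List.length_append, List.length_replicate]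
      omega
    have hheadm3 : (m3.headD []).length = K := by
      rcases List.exists_cons_of_ne_nil hTne with ⟨t, ts, hts⟩
      rw [hm3, hts]
      simp only [List.map_cons, List.headD_cons]
      exact hpadlen _
    rw [hheadm3]
    refine List.map_congr_left (fun i _ => ?_)
    exact map_range_getD m3 (fun r => r.getD i 0)
  · have ho : (operator == "C") = false := by simp [hC]
    simp only [process, process_alt, ho, Bool.false_eq_true, ite_false]
    rw [fold1_eq]
    dsimp only
    obtain ⟨hM0, hMle⟩ := PySem.List.le_foldl_max_int matrix (fun row => PySem.List.len (sortRowA row)) 0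
    have harg : ∀ r ∈ matrix.map sortRowA, PySem.List.len r ≤ Mof matrix := by
      intro r hr
      obtain ⟨r0, hr0, rfl⟩ := List.mem_map.1 hr
      exact hMle r0 hr0
    rw [fold2_eq (matrix.map sortRowA) (Mof matrix) hM0 harg]
    have hmap : matrix.map sortRowA = matrix.map sortRowB :=
      List.map_congr_left (fun r _ => sortRow_eq r)
    have hfold : (matrix.map sortRowB).foldl (fun L r => max L (PySem.List.len r)) 0
        = Mof matrix := by
      rw [List.foldl_map]
      exact PySem.List.foldl_congr_mem matrix _ _ 0 (by intro acc x _; rw [sortRow_eq])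
    have hM0' : (0:Int) ≤ Mof matrix := hM0
    rw [hmap, maxfun_eq, hfold, clipL_eq, padded_eq _ _ hM0']
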